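-- pv_equiv track=rewrite | github.com/davialvarez/hacker-rank | cut_the_bamboo.py | cutBamboo
-- ===== SOURCE A (Python) =====
-- def cutBamboo(lengths):
--     # Write your code here
--     # Declare result array
--     result = []
--     # While until lengths is empty
--     while len(lengths) > 0:
--         # Save len of array lengths in result
--         result.append(len(lengths))
--         # Substract min element of lengths to each element with lambda
--         tmp_list = list(map(lambda x: x - min(lengths), lengths))
--         # Create a list with elements > 0
--         tmp_list = list(filter(lambda x: x > 0, tmp_list))
--         # Save tmp_list in lenghts
--         lengths = tmp_list
--     return result
-- ===== SOURCE B (Python) =====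
-- def cutBamboo(lengths):
--     # Sort once; each round's survivor count is read off the sorted list by
--     # dropping the leading run of equal (minimal) values.
--     xs = sorted(lengths)
--     result = []
--     while xs:
--         result.append(len(xs))
--         k = 1
--         while k < len(xs) and xs[k] == xs[0]:
--             k += 1
--         xs = xs[k:]
--     return result
-- ===== Notes on version B (the rewrite author's own statement) =====
-- stated objective: faster
-- what changed: Replaces the repeated subtract-min/filter rebuild of the list (with min() recomputed per element) by one sort followed by a single left-to-right pass that drops each leading run of equal minimal values and records the remaining length.
import Mathlib
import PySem

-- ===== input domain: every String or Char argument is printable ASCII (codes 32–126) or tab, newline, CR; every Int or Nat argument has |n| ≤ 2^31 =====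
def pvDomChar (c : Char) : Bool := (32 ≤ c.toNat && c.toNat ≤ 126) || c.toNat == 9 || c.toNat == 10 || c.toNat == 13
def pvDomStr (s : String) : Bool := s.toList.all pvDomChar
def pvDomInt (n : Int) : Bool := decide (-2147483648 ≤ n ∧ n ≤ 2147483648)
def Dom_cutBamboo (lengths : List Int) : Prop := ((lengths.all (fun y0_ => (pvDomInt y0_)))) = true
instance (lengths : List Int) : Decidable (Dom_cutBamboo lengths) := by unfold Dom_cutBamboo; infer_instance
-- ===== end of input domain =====

-- B sorts once and reads each round's survivor count off the sorted list (drop the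
-- leading run of minimal values each round) instead of rescanning/rebuilding the list;
-- return values are identical, no side effects in either version.

-- ===== PORT A =====
-- termination helper for the while loop: the filtered list is strictly shorter
-- (the minimum maps to 0, which the filter removes)
-- one trimming round: subtract the minimum, keep the strictly positive remainders
def pvNext (l : List Int) (m : Int) : List Int :=
  (l.map (fun x => x - m)).filter (fun x => decide (0 < x))

theorem pvNextLenLt (l : List Int) (m : Int)
    (h : PySem.List.min? l (fun x => x) = some m) :
    (pvNext l m).length < l.length := by
  unfold pvNext
  have hm : m ∈ l := PySem.List.min?_mem h
  have h0 : (0 : Int) ∈ l.map (fun x => x - m) := by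
    exact List.mem_map.mpr ⟨m, hm, by ring⟩
  calc ((l.map (fun x => x - m)).filter (fun x => decide (0 < x))).length
      < (l.map (fun x => x - m)).length := by
        rw [List.length_filter_lt_length_iff_exists]
        exact ⟨0, h0, by decide⟩
    _ = l.length := List.length_map ..

def cutBamboo (lengths : List Int) : List Int :=
  if lengths.length > 0 then
    match h : PySem.List.min? lengths (fun x => x) with
    | some m =>
      -- result.append(len(lengths)); lengths = [x - min for x in lengths if x - min > 0]
      (lengths.length : Int) :: cutBamboo (pvNext lengths m)
    | none => []   -- unreachable: the list is nonempty here
  else []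
termination_by lengths.length
decreasing_by exact pvNextLenLt lengths m h

-- ===== PORT B =====
-- inner while loop: drop the leading run of values equal to the head, then recurse
def cutBambooAltGo : List Int → List Int
  | [] => []
  | x :: r =>
    ((r.length : Int) + 1) :: cutBambooAltGo (r.dropWhile (fun y => y == x))
termination_by l => l.length
decreasing_by
  exact Nat.lt_succ_of_le (List.length_dropWhile_le _ r)

def cutBamboo_alt (lengths : List Int) : List Int :=
  cutBambooAltGo (PySem.List.sorted lengths (fun x => x) false)

-- ===== PRECONDITION & SPEC =====
def Spec_cutBamboo (lengths : List Int) (out : List Int) : Prop := out = cutBamboo_alt lengths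
instance (lengths : List Int) (out : List Int) : Decidable (Spec_cutBamboo lengths out) := by unfold Spec_cutBamboo; infer_instance

-- ===== CLAIM (what is proved, stated in full; the proofs are below) =====
def Claim_equal_cutBamboo : Prop := ∀ (lengths : List Int), Dom_cutBamboo lengths → Spec_cutBamboo lengths (cutBamboo lengths)

-- ===== LEMMAS AND PROOFS =====

-- the recursion of B is invariant under subtracting a constant from every element
theorem altGo_map_sub (c : Int) : ∀ (u : List Int),
    cutBambooAltGo (u.map (fun y => y - c)) = cutBambooAltGo u := by
  intro u
  induction u using cutBambooAltGo.induct with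
  | case1 => simp [cutBambooAltGo]
  | case2 x r ih =>
    rw [List.map_cons, cutBambooAltGo, cutBambooAltGo]
    rw [List.dropWhile_map]
    have hpred : ((fun y => y == x - c) ∘ fun y => y - c) = (fun y => y == x) := by
      funext y
      by_cases hy : y = x
      · simp [hy]
      · simp [sub_left_inj, hy]
    rw [hpred, ih]
    simp

-- on a sorted list whose elements are all ≥ m, keeping the elements > m is
-- dropping the leading run of m's
theorem filter_gt_eq_dropWhile (m : Int) : ∀ (t : List Int),
    t.Pairwise (· ≤ ·) → (∀ y ∈ t, m ≤ y) →
    t.filter (fun y => decide (m < y)) = t.dropWhile (fun y => y == m) := by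
  intro t
  induction t with
  | nil => simp
  | cons a t' ih =>
    intro hp hmin
    by_cases ha : a = m
    · subst ha
      rw [List.filter_cons, List.dropWhile_cons]
      simp only [lt_self_iff_false, decide_false, Bool.false_eq_true, if_false, BEq.rfl, if_true]
      exact ih hp.tail (fun y hy => hmin y (List.mem_cons_of_mem a hy))
    · have hma : m < a := lt_of_le_of_ne (hmin a List.mem_cons_self) (fun h => ha h.symm)
      rw [List.filter_cons, List.dropWhile_cons]
      simp only [hma, decide_true, if_true, beq_iff_eq, ha, if_false]
      congr 1
      exact List.filter_eq_self.mpr (fun y hy => by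
        have := List.rel_of_pairwise_cons hp hy
        simp only [decide_eq_true_eq]
        omega)

-- the head of sorted l is the value min? returns
theorem sorted_head_eq_min (l : List Int) (m : Int) (h : PySem.List.min? l (fun x => x) = some m)
    (x : Int) (t : List Int) (hs : PySem.List.sorted l (fun x => x) false = x :: t) :
    x = m := by
  have hm : m ∈ l := PySem.List.min?_mem h
  have hx : x ∈ l := by
    have := List.mem_cons_self (a := x) (l := t)
    rw [← hs, PySem.List.mem_sorted] at this
    exact this
  exact le_antisymm (PySem.List.key_head_sorted_le l (fun y => y) hs m hm)
    (PySem.List.min?_isMin h x hx)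

theorem cutBamboo_eq_altGo_sorted : ∀ (l : List Int),
    cutBamboo l = cutBambooAltGo (PySem.List.sorted l (fun x => x) false) := by
  intro l
  induction l using cutBamboo.induct with
  | case1 l h0 m h ih =>
    have hl : l ≠ [] := by intro h'; subst h'; simp at h0
    obtain ⟨x, t, hs⟩ : ∃ x t, PySem.List.sorted l (fun x => x) false = x :: t := by
      cases hsl : PySem.List.sorted l (fun x => x) false with
      | nil => exact absurd ((PySem.List.sorted_eq_nil_iff l _ false).mp hsl) hl
      | cons x t => exact ⟨x, t, rfl⟩
    have hx : x = m := sorted_head_eq_min l m h x t hs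
    rw [hx] at hs
    have hpw : (m :: t).Pairwise (fun a b => a ≤ b) := by
      have hp := PySem.List.sorted_pairwise l (fun y => y)
      rwa [hs] at hp
    -- the next round, sorted, is the tail without its run of minima, shifted by -m
    have h2 : (PySem.List.sorted l (fun y => y) false).filter (fun y => decide (m < y))
        = t.dropWhile (fun y => y == m) := by
      rw [hs, List.filter_cons]
      simp only [lt_self_iff_false, decide_false, Bool.false_eq_true, if_false]
      exact filter_gt_eq_dropWhile m t hpw.tail
        (fun y hy => List.rel_of_pairwise_cons hpw hy)
    have h1 : pvNext l m = (l.filter (fun y => decide (m < y))).map (fun y => y - m) := by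
      unfold pvNext
      rw [List.filter_map]
      exact congrArg _ (List.filter_congr (fun y _ => by
        simp only [Function.comp_apply, decide_eq_decide]
        omega))
    have hperm : ((t.dropWhile (fun y => y == m)).map (fun y => y - m)).Perm (pvNext l m) := by
      rw [h1, ← h2]
      exact ((PySem.List.sorted_perm l (fun y => y) false).filter _).map _
    have hys : ((t.dropWhile (fun y => y == m)).map (fun y => y - m)).Pairwise (· ≤ ·) := by
      refine List.pairwise_map.mpr ?_
      exact ((hpw.tail).sublist (List.dropWhile_sublist _)).imp (fun hab => by omega)
    have hnext : PySem.List.sorted (pvNext l m) (fun y => y) false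
        = (t.dropWhile (fun y => y == m)).map (fun y => y - m) :=
      PySem.List.sorted_id_eq_of_perm_of_pairwise _ _ hperm hys
    have hlen : (l.length : Int) = (t.length : Int) + 1 := by
      have hL := PySem.List.length_sorted l (fun y => y) false
      rw [hs] at hL
      simp only [List.length_cons] at hL
      omega
    rw [cutBamboo, if_pos h0, h, hs]
    show ((l.length : Int) :: cutBamboo (pvNext l m)) = _
    conv_rhs => rw [cutBambooAltGo]
    rw [ih, hnext, altGo_map_sub m, hlen]
  | case2 l h0 h =>
    exact absurd ((PySem.List.min?_eq_none_iff l _).mp h) (by intro h'; subst h'; simp at h0)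
  | case3 l h0 =>
    have hl : l = [] := by
      cases l with
      | nil => rfl
      | cons a r => exact absurd (by simp) h0
    subst hl
    rw [cutBamboo]
    simp [cutBambooAltGo, (PySem.List.sorted_eq_nil_iff ([] : List Int) _ false).mpr rfl]

-- ===== VERDICT (by name: the statement is the Claim_ definition above) =====
theorem cutBamboo_spec : Claim_equal_cutBamboo := by
  intro lengths _
  unfold Spec_cutBamboo cutBamboo_alt
  exact cutBamboo_eq_altGo_sorted lengths
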